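-- pv_equiv track=rewrite | github.com/KULeuven-MICAS/snax-mlir | snaxc/ir/dart/scheduler.py | cost_of_tiling
-- ===== SOURCE A (Python) =====
-- def cost_of_tiling(
--     tiling: list[tuple[int, int, bool]],
--     request_per_streamer: list[int],
--     invariance_map: list[set[int]],
-- ):
--     """
--     Calculate the cost of a tiling as the total tile size (product of all tile sizes).
--     tiling: list of (dim_idx, size, is_critical) from inner to outer?
--             optimal_tiling.py logic implies tiling list is built [Inner ... Outer].
--             cost_of_tiling in optimal_tiling.py iterates reversed(tiling) -> Outer to Inner.
--             Here we assume input `tiling` is [Inner, ..., Outer].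
--     """
--     # Initialize costs for each operand
--     operand_costs = [1] * len(request_per_streamer)
--
--     # Iterate from Outer to Inner
--     for dim_idx, tile_size, is_critical in reversed(tiling):
--         for op_idx, cost in enumerate(operand_costs):
--
--             # If this dimension is critical for this operand, we stop accumulating cost
--             if is_critical and (dim_idx in invariance_map[op_idx]):
--                 continue
--
--             # Otherwise, multiply cost
--             operand_costs[op_idx] *= tile_size
--
--     total_cost = sum(c * r for c, r in zip(operand_costs, request_per_streamer))
--     return total_cost
-- ===== SOURCE B (Python) =====
-- def cost_of_tiling(
--     tiling: list[tuple[int, int, bool]],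
--     request_per_streamer: list[int],
--     invariance_map: list[set[int]],
-- ):
--     # Split dims once: non-critical dims collapse into one shared base factor,
--     # critical dims are kept for a per-operand membership-filtered product.
--     base = 1
--     critical = []
--     for dim_idx, tile_size, is_critical in tiling:
--         if is_critical:
--             critical.append((dim_idx, tile_size))
--         else:
--             base *= tile_size
--     total = 0
--     for op_idx, request in enumerate(request_per_streamer):
--         cost = base
--         for dim_idx, tile_size in critical:
--             if dim_idx not in invariance_map[op_idx]:
--                 cost *= tile_size
--         total += cost * request
--     return total
-- ===== Notes on version B (the rewrite author's own statement) =====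
-- stated objective: alternative
-- what changed: Replaces the per-dimension sweep that rewrites every operand's cost with a one-pass split of the tiling into a shared non-critical base product plus per-operand products over only the critical dims, summed against the requests.
import Mathlib
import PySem

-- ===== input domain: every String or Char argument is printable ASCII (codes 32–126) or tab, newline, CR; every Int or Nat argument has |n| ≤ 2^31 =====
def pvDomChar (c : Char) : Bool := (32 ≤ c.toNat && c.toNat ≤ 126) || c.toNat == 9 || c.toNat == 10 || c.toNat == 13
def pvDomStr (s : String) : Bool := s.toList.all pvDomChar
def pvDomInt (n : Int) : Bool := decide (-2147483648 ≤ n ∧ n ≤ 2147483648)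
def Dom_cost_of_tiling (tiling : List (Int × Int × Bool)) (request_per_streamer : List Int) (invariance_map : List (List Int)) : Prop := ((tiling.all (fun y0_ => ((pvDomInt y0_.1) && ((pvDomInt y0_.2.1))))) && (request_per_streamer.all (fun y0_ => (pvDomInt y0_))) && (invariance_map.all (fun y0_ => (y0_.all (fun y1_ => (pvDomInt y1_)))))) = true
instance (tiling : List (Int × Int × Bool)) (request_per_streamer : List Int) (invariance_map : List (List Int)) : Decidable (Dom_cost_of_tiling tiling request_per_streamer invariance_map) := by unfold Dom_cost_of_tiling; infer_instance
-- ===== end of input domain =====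

-- B replaces A's per-dimension sweep over all operand costs by a one-pass split into a
-- non-critical base product plus per-operand critical-only products (objective: alternative).

-- ===== PORT A =====
def cost_of_tiling (tiling : List (Int × Int × Bool)) (request_per_streamer : List Int) (invariance_map : List (List Int)) : Int :=
  let init : List Int := List.replicate request_per_streamer.length 1
  let operand_costs := tiling.reverse.foldl
    (fun (operand_costs : List Int) t =>
      (PySem.List.enumerate operand_costs 0).map (fun p =>
        if t.2.2 && decide (t.1 ∈ PySem.List.pyGetD invariance_map p.1 []) then p.2 else p.2 * t.2.1))
    init
  (operand_costs.zip request_per_streamer).foldl (fun s p => s + p.1 * p.2) 0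

-- ===== PORT B =====
def cost_of_tiling_alt (tiling : List (Int × Int × Bool)) (request_per_streamer : List Int) (invariance_map : List (List Int)) : Int :=
  let st := tiling.foldl
    (fun (st : Int × List (Int × Int)) t =>
      if t.2.2 then (st.1, st.2 ++ [(t.1, t.2.1)]) else (st.1 * t.2.1, st.2))
    (1, [])
  (PySem.List.enumerate request_per_streamer 0).foldl
    (fun total p =>
      total + (st.2.foldl (fun c q =>
        if decide (q.1 ∈ PySem.List.pyGetD invariance_map p.1 []) then c else c * q.2) st.1) * p.2)
    0

-- ===== PRECONDITION & SPEC =====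
-- Pre_ excludes exactly the inputs where the Python A raises IndexError: a critical
-- dimension exists while invariance_map is shorter than request_per_streamer.
def Pre_cost_of_tiling (tiling : List (Int × Int × Bool)) (request_per_streamer : List Int) (invariance_map : List (List Int)) : Prop :=
  (tiling.any (fun t => t.2.2)) = true → request_per_streamer.length ≤ invariance_map.length
instance (tiling : List (Int × Int × Bool)) (request_per_streamer : List Int) (invariance_map : List (List Int)) : Decidable (Pre_cost_of_tiling tiling request_per_streamer invariance_map) := by unfold Pre_cost_of_tiling; infer_instance
def pvWitness_cost_of_tiling : (List (Int × Int × Bool)) × List Int × List (List Int) :=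
  ([(0, 2, true), (1, 3, false)], [5, 7], [[0], []])

def Spec_cost_of_tiling (tiling : List (Int × Int × Bool)) (request_per_streamer : List Int) (invariance_map : List (List Int)) (out : Int) : Prop := out = cost_of_tiling_alt tiling request_per_streamer invariance_map
instance (tiling : List (Int × Int × Bool)) (request_per_streamer : List Int) (invariance_map : List (List Int)) (out : Int) : Decidable (Spec_cost_of_tiling tiling request_per_streamer invariance_map out) := by unfold Spec_cost_of_tiling; infer_instance

-- ===== CLAIM (what is proved, stated in full; the proofs are below) =====
def Claim_equal_cost_of_tiling : Prop := ∀ (tiling : List (Int × Int × Bool)) (request_per_streamer : List Int) (invariance_map : List (List Int)), Dom_cost_of_tiling tiling request_per_streamer invariance_map → Pre_cost_of_tiling tiling request_per_streamer invariance_map → Spec_cost_of_tiling tiling request_per_streamer invariance_map (cost_of_tiling tiling request_per_streamer invariance_map)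

-- ===== LEMMAS AND PROOFS =====

-- A's loop body and B's splitting step, named for the proofs (defeq to the ports' lambdas)
def pvStepA (invariance_map : List (List Int)) (operand_costs : List Int) (t : Int × Int × Bool) : List Int :=
  (PySem.List.enumerate operand_costs 0).map (fun p =>
    if t.2.2 && decide (t.1 ∈ PySem.List.pyGetD invariance_map p.1 []) then p.2 else p.2 * t.2.1)

def pvStepB (st : Int × List (Int × Int)) (t : Int × Int × Bool) : Int × List (Int × Int) :=
  if t.2.2 then (st.1, st.2 ++ [(t.1, t.2.1)]) else (st.1 * t.2.1, st.2)

-- per-operand, per-dimension factor both programs multiply in (1 when skipped)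
def pvF (invariance_map : List (List Int)) (k : Nat) (t : Int × Int × Bool) : Int :=
  if t.2.2 && decide (t.1 ∈ invariance_map.getD k []) then 1 else t.2.1

theorem pvA_fold_getElem (invariance_map : List (List Int))
    (L : List (Int × Int × Bool)) :
    ∀ (cs : List Int) (k : Nat),
    (L.foldl (pvStepA invariance_map) cs)[k]?
    = cs[k]?.map (· * (L.map (pvF invariance_map k)).prod) := by
  induction L with
  | nil => intro cs k; cases h : cs[k]? <;> simp [h]
  | cons t L ih =>
    intro cs k
    rw [List.foldl_cons, ih]
    simp only [pvStepA, List.getElem?_map, PySem.List.getElem?_enumerate]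
    cases h : cs[k]? with
    | none => simp
    | some c =>
      simp only [Option.map_some, List.map_cons, List.prod_cons, pvF, zero_add,
        PySem.List.pyGetD_natCast]
      split_ifs with hc
      · simp
      · simp [mul_assoc]

theorem pvA_length (invariance_map : List (List Int))
    (L : List (Int × Int × Bool)) : ∀ (cs : List Int),
    (L.foldl (pvStepA invariance_map) cs).length = cs.length := by
  induction L with
  | nil => intro cs; rfl
  | cons t L ih =>
    intro cs
    rw [List.foldl_cons, ih]
    simp [pvStepA, PySem.List.length_enumerate]

theorem pvB_inner (invariance_map : List (List Int)) (k : Nat)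
    (cr : List (Int × Int)) : ∀ (c : Int),
    cr.foldl (fun c q =>
      if decide (q.1 ∈ invariance_map.getD k []) then c else c * q.2) c
    = c * (cr.map (fun q => if q.1 ∈ invariance_map.getD k [] then (1:Int) else q.2)).prod := by
  induction cr with
  | nil => intro c; simp
  | cons q cr ih =>
    intro c
    simp only [List.foldl_cons, List.map_cons, List.prod_cons]
    rw [ih]
    simp only [decide_eq_true_eq]
    split_ifs with hq <;> ring

theorem pvB_state (invariance_map : List (List Int)) (k : Nat)
    (L : List (Int × Int × Bool)) : ∀ (a : Int) (cr : List (Int × Int)),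
    (L.foldl pvStepB (a, cr)).1
      * ((L.foldl pvStepB (a, cr)).2.map
          (fun q => if q.1 ∈ invariance_map.getD k [] then (1:Int) else q.2)).prod
    = a * (cr.map (fun q => if q.1 ∈ invariance_map.getD k [] then (1:Int) else q.2)).prod
        * (L.map (pvF invariance_map k)).prod := by
  induction L with
  | nil => intro a cr; simp
  | cons t L ih =>
    intro a cr
    simp only [List.foldl_cons, List.map_cons, List.prod_cons]
    by_cases ht : t.2.2
    · simp only [pvStepB, ht, if_true]
      rw [ih]
      simp only [List.map_append, List.prod_append, List.map_cons, List.map_nil,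
        List.prod_cons, List.prod_nil, pvF, ht, Bool.true_and, decide_eq_true_eq]
      split_ifs with hm <;> ring
    · simp only [pvStepB, ht, Bool.false_eq_true, if_false]
      rw [ih]
      simp only [pvF, ht, Bool.false_and, Bool.false_eq_true, if_false]
      ring

theorem pv_sum_zip_enum (BInner : Int → Int) :
    ∀ (rps costs : List Int) (j s : Int),
    costs.length = rps.length →
    (∀ (k : Nat), k < rps.length → costs[k]? = some (BInner (j + k))) →
    (costs.zip rps).foldl (fun s p => s + p.1 * p.2) s
    = (PySem.List.enumerate rps j).foldl (fun tot p => tot + BInner p.1 * p.2) s := by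
  intro rps
  induction rps with
  | nil =>
    intro costs j s hlen _
    have : costs = [] := List.eq_nil_of_length_eq_zero hlen
    simp [this, PySem.List.enumerate]
  | cons r rs ih =>
    intro costs j s hlen hk
    cases costs with
    | nil => simp at hlen
    | cons c cs =>
      have h0 := hk 0 (by simp)
      simp only [List.getElem?_cons_zero, Nat.cast_zero, add_zero, Option.some_inj] at h0
      rw [List.zip_cons_cons, List.foldl_cons, PySem.List.enumerate_cons, List.foldl_cons, h0]
      refine ih cs (j + 1) (s + BInner j * r) (by simpa using hlen) ?_
      intro k hklt
      have := hk (k + 1) (by simpa using Nat.succ_lt_succ hklt)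
      simpa [add_assoc, add_comm, add_left_comm] using this

-- ===== VERDICT (by name: the statement is the Claim_ definition above) =====
theorem cost_of_tiling_spec : Claim_equal_cost_of_tiling := by
  intro tiling rps inv _ _
  show cost_of_tiling tiling rps inv = cost_of_tiling_alt tiling rps inv
  have key := pv_sum_zip_enum
      (fun i => (tiling.foldl pvStepB (1, [])).2.foldl
          (fun c q => if decide (q.1 ∈ PySem.List.pyGetD inv i []) then c else c * q.2)
          (tiling.foldl pvStepB (1, [])).1)
      rps
      (tiling.reverse.foldl (pvStepA inv) (List.replicate rps.length 1))
      0 0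
      (by rw [pvA_length]; simp)
      (by
        intro k hk
        rw [pvA_fold_getElem]
        have hrep : (List.replicate rps.length (1 : Int))[k]? = some 1 := by
          simp [hk]
        rw [hrep]
        simp only [Option.map_some, one_mul, zero_add, PySem.List.pyGetD_natCast]
        rw [pvB_inner inv k, pvB_state inv k]
        simp [List.map_reverse, List.prod_reverse])
  exact key
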